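-- pv_equiv track=rewrite | github.com/95westus/R-YORS | SRC/tools/emit_msbasic_osi_wdc.py | split_args
-- ===== SOURCE A (Python) =====
-- def split_args(text: str) -> list[str]:
--     args: list[str] = []
--     cur: list[str] = []
--     in_quote = False
--     quote = ""
--     for ch in text:
--         if ch in ("'", '"'):
--             if not in_quote:
--                 in_quote = True
--                 quote = ch
--             elif quote == ch:
--                 in_quote = False
--             cur.append(ch)
--         elif ch == "," and not in_quote:
--             args.append("".join(cur).strip())
--             cur = []
--         else:
--             cur.append(ch)
--     if cur or text.endswith(","):
--         args.append("".join(cur).strip())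
--     return args
-- ===== SOURCE B (Python) =====
-- def split_args(text: str) -> list[str]:
--     if not text:
--         return []
--     bounds: list[int] = []
--     in_quote = False
--     quote = ""
--     for i, ch in enumerate(text):
--         if ch in ("'", '"'):
--             if not in_quote:
--                 in_quote = True
--                 quote = ch
--             elif quote == ch:
--                 in_quote = False
--         elif ch == "," and not in_quote:
--             bounds.append(i)
--     parts: list[str] = []
--     prev = 0
--     for i in bounds:
--         parts.append(text[prev:i].strip())
--         prev = i + 1
--     parts.append(text[prev:].strip())
--     return parts
-- ===== Notes on version B (the rewrite author's own statement) =====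
-- stated objective: alternative
-- what changed: Instead of accumulating a character buffer that is flushed at each top-level comma, B first records the indices of all top-level commas in one scan, then produces the result in a second pass by slicing the text between consecutive boundaries and stripping each slice.
import Mathlib
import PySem

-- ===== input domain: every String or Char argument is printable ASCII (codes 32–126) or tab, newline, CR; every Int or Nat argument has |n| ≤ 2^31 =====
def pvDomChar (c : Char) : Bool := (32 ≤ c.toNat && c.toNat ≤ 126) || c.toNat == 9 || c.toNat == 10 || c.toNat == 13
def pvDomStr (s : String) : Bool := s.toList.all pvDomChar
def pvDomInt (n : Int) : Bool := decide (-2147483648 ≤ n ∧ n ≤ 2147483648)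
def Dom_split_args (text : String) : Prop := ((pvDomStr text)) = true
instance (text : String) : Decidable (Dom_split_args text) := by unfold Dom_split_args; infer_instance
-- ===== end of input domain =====

-- B replaces A's flush-a-buffer-at-each-comma loop by a boundary-index scan plus a second slicing pass; same cost, different structure.

-- ===== PORT A =====
-- one step of A's for-loop; state = (args, cur, in_quote, quote)
def splitStepA (st : List String × List Char × Bool × String) (ch : Char) :
    List String × List Char × Bool × String :=
  match st with
  | (args, cur, in_quote, quote) =>
    if ch = '\'' ∨ ch = '"' then
      if in_quote = false then (args, cur ++ [ch], true, String.singleton ch)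
      else if quote = String.singleton ch then (args, cur ++ [ch], false, quote)
      else (args, cur ++ [ch], in_quote, quote)
    else if ch = ',' ∧ in_quote = false then
      (args ++ [PySem.Str.strip (String.ofList cur)], ([] : List Char), in_quote, quote)
    else (args, cur ++ [ch], in_quote, quote)

def split_args (text : String) : List String :=
  match text.toList.foldl splitStepA ([], [], false, "") with
  | (args, cur, _, _) =>
    if cur ≠ [] ∨ PySem.Str.endswith text "," = true then
      args ++ [PySem.Str.strip (String.ofList cur)]
    else args

-- ===== PORT B =====
-- one step of B's first loop over enumerate(text); state = (bounds, in_quote, quote)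
def splitStepB (st : List Int × Bool × String) (p : Int × Char) : List Int × Bool × String :=
  match st, p with
  | (bounds, in_quote, quote), (i, ch) =>
    if ch = '\'' ∨ ch = '"' then
      if in_quote = false then (bounds, true, String.singleton ch)
      else if quote = String.singleton ch then (bounds, false, quote)
      else (bounds, in_quote, quote)
    else if ch = ',' ∧ in_quote = false then (bounds ++ [i], in_quote, quote)
    else (bounds, in_quote, quote)

-- one step of B's second loop over bounds; state = (parts, prev)
def sliceStepB (text : String) (st : List String × Int) (i : Int) : List String × Int :=
  (st.1 ++ [PySem.Str.strip (PySem.Str.slice text (some st.2) (some i))], i + 1)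

def split_args_alt (text : String) : List String :=
  if text = "" then []
  else
    match (PySem.List.enumerate text.toList 0).foldl splitStepB ([], false, "") with
    | (bounds, _, _) =>
      match bounds.foldl (sliceStepB text) ([], 0) with
      | (parts, prev) => parts ++ [PySem.Str.strip (PySem.Str.slice text (some prev) none)]

-- ===== PRECONDITION & SPEC =====
def Spec_split_args (text : String) (out : List String) : Prop := out = split_args_alt text
instance (text : String) (out : List String) : Decidable (Spec_split_args text out) := by unfold Spec_split_args; infer_instance

-- ===== CLAIM (what is proved, stated in full; the proofs are below) =====
def Claim_equal_split_args : Prop := ∀ (text : String), Dom_split_args text → Spec_split_args text (split_args text)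

-- ===== LEMMAS AND PROOFS =====

-- the common meaning of both programs: the stripped segments of `p ++ cs`,
-- where `p` is the pending text accumulated before `cs`
def glue : List Char → List Char → Bool → String → List String
  | p, [], _, _ => [PySem.Str.strip (String.ofList p)]
  | p, c :: cs, iq, q =>
    if c = '\'' ∨ c = '"' then
      if iq = false then glue (p ++ [c]) cs true (String.singleton c)
      else if q = String.singleton c then glue (p ++ [c]) cs false q
      else glue (p ++ [c]) cs iq q
    else if c = ',' ∧ iq = false then
      PySem.Str.strip (String.ofList p) :: glue [] cs iq q
    else glue (p ++ [c]) cs iq q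

-- recursive form of B's first loop: boundary indices (as naturals), starting at position k
def bnds : List Char → Nat → Bool → String → List Nat × Bool × String
  | [], _, iq, q => ([], iq, q)
  | c :: cs, k, iq, q =>
    if c = '\'' ∨ c = '"' then
      if iq = false then bnds cs (k+1) true (String.singleton c)
      else if q = String.singleton c then bnds cs (k+1) false q
      else bnds cs (k+1) iq q
    else if c = ',' ∧ iq = false then
      match bnds cs (k+1) iq q with
      | (bs, iq', q') => (k :: bs, iq', q')
    else bnds cs (k+1) iq q

-- recursive form of B's second loop (including the final tail append)
def partsRec (full : List Char) : Nat → List Nat → List String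
  | prev, [] => [PySem.Str.strip (String.ofList (full.drop prev))]
  | prev, i :: bs =>
      PySem.Str.strip (String.ofList ((full.take i).drop prev)) :: partsRec full (i+1) bs

theorem foldA_glue (cs : List Char) : ∀ (args : List String) (p : List Char) (iq : Bool) (q : String),
    (cs.foldl splitStepA (args, p, iq, q)).1 ++
      [PySem.Str.strip (String.ofList (cs.foldl splitStepA (args, p, iq, q)).2.1)]
      = args ++ glue p cs iq q := by
  induction cs with
  | nil => intro args p iq q; simp [glue]
  | cons c cs ih =>
    intro args p iq q
    simp only [List.foldl_cons, splitStepA, glue]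
    split_ifs <;> simp [ih]

theorem foldB_bnds (cs : List Char) : ∀ (k : Nat) (acc : List Int) (iq : Bool) (q : String),
    (PySem.List.enumerate cs (k : Int)).foldl splitStepB (acc, iq, q)
      = (acc ++ (bnds cs k iq q).1.map (Nat.cast : Nat → Int), (bnds cs k iq q).2) := by
  induction cs with
  | nil => intro k acc iq q; simp [bnds, PySem.List.enumerate_nil]
  | cons c cs ih =>
    intro k acc iq q
    rw [PySem.List.enumerate_cons]
    have hk : (k : Int) + 1 = ((k + 1 : Nat) : Int) := by push_cast; ring
    simp only [List.foldl_cons, splitStepB, bnds]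
    split_ifs with h1 h2 h3 h4
    · rw [hk, ih]
    · rw [hk, ih]
    · rw [hk, ih]
    · rcases hb : bnds cs (k+1) iq q with ⟨bs, iq', q'⟩
      rw [hk, ih]; simp [hb]
    · rw [hk, ih]

theorem foldP_partsRec (text : String) (bs : List Nat) :
    ∀ (acc : List String) (prev : Nat),
    ((bs.map (Nat.cast : Nat → Int)).foldl (sliceStepB text) (acc, (prev : Int)) =
      (acc ++ (partsRec text.toList prev bs).dropLast,
        ((bs.foldl (fun _ i => i + 1) prev : Nat) : Int)))
    ∧ (partsRec text.toList prev bs).dropLast ++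
        [PySem.Str.strip (PySem.Str.slice text (some ((bs.foldl (fun _ i => i + 1) prev : Nat) : Int)) none)]
        = partsRec text.toList prev bs := by
  induction bs with
  | nil =>
    intro acc prev
    refine ⟨by simp [partsRec], ?_⟩
    have : PySem.Str.slice text (some ((prev : Nat) : Int)) none
        = String.ofList (text.toList.drop prev) := by
      apply String.ext
      simp [PySem.Str.toList_slice, PySem.List.slice_from_natCast]
    simp [partsRec, this]
  | cons i bs ih =>
    intro acc prev
    have hslice : PySem.Str.slice text (some ((prev : Nat) : Int)) (some ((i : Nat) : Int))
        = String.ofList ((text.toList.take i).drop prev) := by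
      apply String.ext
      simp [PySem.Str.toList_slice, PySem.List.slice_natCast]
      rw [List.drop_take]
    have h1 : (((i : Nat) : Int) + 1) = (((i + 1 : Nat) : Nat) : Int) := by push_cast; ring
    have hne : partsRec text.toList (i+1) bs ≠ [] := by
      cases bs <;> simp [partsRec]
    constructor
    · simp only [List.map_cons, List.foldl_cons, sliceStepB, hslice, h1]
      rw [(ih _ (i+1)).1]
      simp [partsRec, List.dropLast_cons_of_ne_nil hne]
    · have h2 := (ih acc (i+1)).2
      simp only [partsRec, List.foldl_cons, List.dropLast_cons_of_ne_nil hne,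
        List.cons_append]
      rw [h2]

theorem partsRec_glue (full : List Char) (cs : List Char) :
    ∀ (k prev : Nat) (iq : Bool) (q : String), prev ≤ k → full.drop k = cs →
    partsRec full prev (bnds cs k iq q).1 = glue ((full.take k).drop prev) cs iq q := by
  induction cs with
  | nil =>
    intro k prev iq q hpk hdrop
    have hlen : full.length ≤ k := by
      by_contra h
      have := List.drop_eq_nil_iff.mp hdrop
      omega
    simp [bnds, partsRec, glue, List.take_of_length_le hlen]
  | cons c cs ih =>
    intro k prev iq q hpk hdrop
    have hklt : k < full.length := by
      by_contra h
      have : full.drop k = [] := List.drop_eq_nil_iff.mpr (by omega)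
      rw [this] at hdrop; exact (List.cons_ne_nil c cs) hdrop.symm
    have htake : full.take (k+1) = full.take k ++ [c] := by
      rw [List.take_add, List.take_one]
      rw [hdrop]
      simp
    have hdrop' : full.drop (k+1) = cs := by
      have : full.drop (k+1) = (full.drop k).drop 1 := by
        rw [List.drop_drop]
      rw [this, hdrop]; simp
    have hlen_take : prev ≤ (full.take k).length := by
      simp [List.length_take]; omega
    have hseg : (full.take (k+1)).drop prev = (full.take k).drop prev ++ [c] := by
      rw [htake, List.drop_append_of_le_length hlen_take]
    simp only [bnds, glue]
    split_ifs with h1 h2 h3 h4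
    · rw [ih (k+1) prev _ _ (by omega) hdrop', hseg]
    · rw [ih (k+1) prev _ _ (by omega) hdrop', hseg]
    · rw [ih (k+1) prev _ _ (by omega) hdrop', hseg]
    · rcases hb : bnds cs (k+1) iq q with ⟨bs, iq', q'⟩
      have := ih (k+1) (k+1) iq q (le_refl _) hdrop'
      rw [hb] at this
      have hempty : (full.take (k+1)).drop (k+1) = [] :=
        List.drop_eq_nil_iff.mpr (by simp [List.length_take])
      rw [hempty] at this
      simp only [partsRec]
      rw [this]
    · rw [ih (k+1) prev _ _ (by omega) hdrop', hseg]

-- after processing a nonempty text, A's final-append condition always holds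
theorem final_cond (xs : List Char) (c : Char) (st : List String × List Char × Bool × String) :
    ((xs ++ [c]).foldl splitStepA st).2.1 ≠ [] ∨ c = ',' := by
  rw [List.foldl_append]
  rcases xs.foldl splitStepA st with ⟨args, cur, iq, q⟩
  simp only [List.foldl_cons, List.foldl_nil, splitStepA]
  split_ifs with h1 h2 h3 h4
  · left; simp
  · left; simp
  · left; simp
  · right; exact h4.1
  · left; simp

theorem endswith_concat_comma (text : String) (xs : List Char)
    (h : text.toList = xs ++ [',']) : PySem.Str.endswith text "," = true := by
  rw [PySem.Str.endswith_eq]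
  rw [PySem.Chars.endswith_iff]
  exact ⟨xs, by simpa using h.symm⟩

-- ===== VERDICT (by name: the statement is the Claim_ definition above) =====
theorem split_args_spec : Claim_equal_split_args := by
  intro text _
  unfold Spec_split_args split_args split_args_alt
  by_cases hempty : text = ""
  · subst hempty
    decide
  · have hne : text.toList ≠ [] := by
      intro h
      apply hempty
      have := congrArg String.ofList h
      simpa using this
    simp only [if_neg hempty]
    -- B side
    rcases hB : (PySem.List.enumerate text.toList 0).foldl splitStepB ([], false, "") with ⟨bounds, iqB, qB⟩
    have hB' := foldB_bnds text.toList 0 [] false ""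
    rw [show ((0:Nat):Int) = 0 by norm_num] at hB'
    rw [hB'] at hB
    rcases hbn : bnds text.toList 0 false "" with ⟨bs, iq', q'⟩
    rw [hbn] at hB
    have hbounds : bounds = bs.map (Nat.cast : Nat → Int) := by
      simpa using (congrArg Prod.fst hB).symm
    rcases hP : bounds.foldl (sliceStepB text) ([], 0) with ⟨parts, prev⟩
    have hfold := (foldP_partsRec text bs [] 0).1
    have hlast := (foldP_partsRec text bs [] 0).2
    rw [show (((0:Nat)) : Int) = 0 by norm_num] at hfold
    rw [← hbounds] at hfold
    rw [hfold] at hP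
    have hparts : parts = (partsRec text.toList 0 bs).dropLast := by
      simpa using (congrArg Prod.fst hP).symm
    have hprev : prev = ((bs.foldl (fun _ i => i + 1) 0 : Nat) : Int) := by
      simpa using (congrArg Prod.snd hP).symm
    have hBres : parts ++ [PySem.Str.strip (PySem.Str.slice text (some prev) none)]
        = partsRec text.toList 0 bs := by
      rw [hparts, hprev]; exact hlast
    -- partsRec = glue
    have hglue : partsRec text.toList 0 bs = glue [] text.toList false "" := by
      have := partsRec_glue text.toList text.toList 0 0 false "" (le_refl 0) (by simp)
      rw [hbn] at this
      simpa using this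
    -- A side
    rcases hA : text.toList.foldl splitStepA ([], [], false, "") with ⟨args, cur, iqA, qA⟩
    have hAglue := foldA_glue text.toList [] [] false ""
    rw [hA] at hAglue
    simp only at hAglue
    -- final condition
    rcases List.eq_nil_or_concat text.toList with h | ⟨xs, c, hxs⟩
    · exact absurd h hne
    · rw [List.concat_eq_append] at hxs
      have hcond : cur ≠ [] ∨ PySem.Str.endswith text "," = true := by
        have := final_cond xs c ([], [], false, "")
        rw [← hxs, hA] at this
        rcases this with h | h
        · left; exact h
        · right; exact endswith_concat_comma text xs (by rw [hxs, h])
      rw [if_pos hcond]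
      rw [hAglue, hBres, hglue]
      simp
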